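-- pv_equiv track=rewrite | github.com/ritesh30gupta06/Synapse-tasks- | Hermione’s Spell 1.py | earliest_step_for_lumos
-- ===== SOURCE A (Python) =====
-- def earliest_step_for_lumos(runes: str) -> int:
--
--     required = set("LUMOS")
--     collected = set()
--
--     for i, ch in enumerate(runes):
--         up = ch.upper()
--         if up in required:
--             collected.add(up)
--             if len(collected) == len(required):
--                 return i + 1
--     return -1
-- ===== SOURCE B (Python) =====
-- def earliest_step_for_lumos(runes: str) -> int:
--     first_seen = {}
--     for i, ch in enumerate(runes):
--         up = ch.upper()
--         if up in "LUMOS" and up not in first_seen: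
--             first_seen[up] = i
--     if all(c in first_seen for c in "LUMOS"):
--         return max(first_seen.values()) + 1
--     return -1
-- ===== Notes on version B (the rewrite author's own statement) =====
-- stated objective: alternative
-- what changed: Replaces the running collected-set with early return by a full scan recording each required letter's first-occurrence index in a dict, then an aggregate step (all present? -> max first index + 1, else -1).
import Mathlib
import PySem

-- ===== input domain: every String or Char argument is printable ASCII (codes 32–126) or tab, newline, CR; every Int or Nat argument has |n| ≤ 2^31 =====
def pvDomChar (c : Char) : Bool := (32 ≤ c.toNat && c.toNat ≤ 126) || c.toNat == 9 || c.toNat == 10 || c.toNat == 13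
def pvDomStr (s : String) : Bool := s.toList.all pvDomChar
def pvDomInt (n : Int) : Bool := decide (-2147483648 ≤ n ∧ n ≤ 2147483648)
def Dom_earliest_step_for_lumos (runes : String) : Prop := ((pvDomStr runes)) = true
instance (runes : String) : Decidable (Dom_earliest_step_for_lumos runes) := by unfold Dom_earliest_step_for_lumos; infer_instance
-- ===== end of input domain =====

-- B replaces A's running collected-set with early return by a full scan recording first-occurrence
-- indices of the required letters, then aggregating (all present → max first index + 1, else -1).

-- ===== PORT A =====
-- required = set("LUMOS")
def lumosRequired : PySem.Set Char := PySem.Set.ofList "LUMOS".toList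

-- the 'for i, ch in enumerate(runes)' loop with early return, state = (i, collected)
def lumosGoA : List Char → Int → PySem.Set Char → Int
  | [], _, _ => -1
  | c :: rest, i, collected =>
    let up := PySem.Chars.upperChar c
    if PySem.Set.contains lumosRequired up then
      let collected' := PySem.Set.add collected up
      if PySem.Set.len collected' = PySem.Set.len lumosRequired then i + 1
      else lumosGoA rest (i + 1) collected'
    else lumosGoA rest (i + 1) collected

def earliest_step_for_lumos (runes : String) : Int :=
  lumosGoA runes.toList 0 PySem.Set.empty

-- ===== PORT B =====
-- the 'for i, ch in enumerate(runes)' loop building first_seen (only fresh required letters inserted)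
def lumosBuild : List Char → Int → PySem.Dict Char Int → PySem.Dict Char Int
  | [], _, d => d
  | c :: rest, i, d =>
    let up := PySem.Chars.upperChar c
    let d' := if PySem.Chars.isIn [up] "LUMOS".toList && !(d.contains up) then d.insert up i else d
    lumosBuild rest (i + 1) d'

def earliest_step_for_lumos_alt (runes : String) : Int :=
  let fs := lumosBuild runes.toList 0 PySem.Dict.empty
  if "LUMOS".toList.all (fun c => fs.contains c) then
    -- max(first_seen.values()) + 1; the 'none' arm is unreachable (all five keys are present)
    match PySem.List.max? fs.values (fun v => v) with
    | some m => m + 1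
    | none => -1
  else -1

-- ===== PRECONDITION & SPEC =====
def Spec_earliest_step_for_lumos (runes : String) (out : Int) : Prop := out = earliest_step_for_lumos_alt runes
instance (runes : String) (out : Int) : Decidable (Spec_earliest_step_for_lumos runes out) := by unfold Spec_earliest_step_for_lumos; infer_instance

-- ===== CLAIM (what is proved, stated in full; the proofs are below) =====
def Claim_equal_earliest_step_for_lumos : Prop := ∀ (runes : String), Dom_earliest_step_for_lumos runes → Spec_earliest_step_for_lumos runes (earliest_step_for_lumos runes)

-- ===== LEMMAS AND PROOFS =====

-- proof-side name for B's aggregate step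
def lumosFinish (fs : PySem.Dict Char Int) : Int :=
  if "LUMOS".toList.all (fun c => fs.contains c) then
    match PySem.List.max? fs.values (fun v => v) with
    | some m => m + 1
    | none => -1
  else -1

lemma isIn_singleton_true (up : Char) (h : up ∈ "LUMOS".toList) :
    PySem.Chars.isIn [up] "LUMOS".toList = true :=
  (PySem.Chars.isIn_iff_infix _ _).2 ((List.singleton_infix_iff ..).2 h)

lemma isIn_singleton_false (up : Char) (h : up ∉ "LUMOS".toList) :
    PySem.Chars.isIn [up] "LUMOS".toList = false := by
  rw [PySem.Chars.isIn_eq_false_iff]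
  exact fun hinf => h ((List.singleton_infix_iff ..).1 hinf)

lemma contains_required_true (up : Char) (h : up ∈ "LUMOS".toList) :
    PySem.Set.contains lumosRequired up = true := by
  simpa [PySem.Set.contains, lumosRequired, PySem.Set.mem_ofList] using h

lemma contains_required_false (up : Char) (h : up ∉ "LUMOS".toList) :
    PySem.Set.contains lumosRequired up = false := by
  simpa [PySem.Set.contains, lumosRequired, PySem.Set.mem_ofList] using h

lemma foldl_max_of_lt (i : Int) :
    ∀ (vs : List Int) (acc : Int), (∀ v ∈ vs, v < i) → acc < i →
      List.foldl max acc (vs ++ [i]) = i := by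
  intro vs
  induction vs with
  | nil => intro acc _ hacc; simpa using max_eq_right hacc.le
  | cons v t ih =>
      intro acc h hacc
      simp only [List.cons_append, List.foldl_cons]
      exact ih (max acc v) (fun w hw => h w (List.mem_cons_of_mem _ hw))
        (max_lt hacc (h v List.mem_cons_self))

lemma max?_append_big (vs : List Int) (i : Int) (h : ∀ v ∈ vs, v < i) :
    PySem.List.max? (vs ++ [i]) (fun v => v) = some i := by
  cases vs with
  | nil => simp [PySem.List.max?_id_cons]
  | cons v t =>
      simp only [List.cons_append, PySem.List.max?_id_cons, Option.some.injEq]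
      exact foldl_max_of_lt i t v (fun w hw => h w (List.mem_cons_of_mem _ hw))
        (h v List.mem_cons_self)

-- once every required letter is a key, the build loop is a no-op
lemma lumosBuild_fixed (rest : List Char) (d : PySem.Dict Char Int)
    (hfull : ∀ k ∈ "LUMOS".toList, d.contains k = true) :
    ∀ i, lumosBuild rest i d = d := by
  induction rest with
  | nil => intro i; rfl
  | cons c t ih =>
      intro i
      have hb : (PySem.Chars.isIn [PySem.Chars.upperChar c] "LUMOS".toList
          && !(d.contains (PySem.Chars.upperChar c))) = false := by
        by_cases hm : PySem.Chars.upperChar c ∈ "LUMOS".toList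
        · rw [hfull _ hm]; simp
        · rw [isIn_singleton_false _ hm]; simp
      simp only [lumosBuild]
      rw [hb, if_neg (by simp : ¬ (false = true))]
      exact ih (i + 1)

lemma lumos_main (rest : List Char) (i : Int) (d : PySem.Dict Char Int)
    (hnd : d.keys.Nodup)
    (hsub : ∀ k ∈ d.keys, k ∈ "LUMOS".toList)
    (hv : ∀ v ∈ d.values, v < i)
    (hlen : d.keys.length < 5) :
    lumosGoA rest i d.keys = lumosFinish (lumosBuild rest i d) := by
  induction rest generalizing i d with
  | nil =>
      -- A returns -1; B: some required letter is missing, so all(...) is false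
      simp only [lumosGoA, lumosBuild, lumosFinish]
      have hnotall : ¬ ∀ k ∈ "LUMOS".toList, d.contains k = true := by
        intro hall
        have hsub' : "LUMOS".toList ⊆ d.keys := fun k hk =>
          (PySem.Dict.contains_iff_mem_keys d k).1 (hall k hk)
        have hnd' : ("LUMOS".toList).Nodup := by decide
        have hle := (hnd'.subperm hsub').length_le
        have h5 : ("LUMOS".toList).length = 5 := by decide
        omega
      have hfalse : ("LUMOS".toList.all (fun c => d.contains c)) = false := by
        rw [← Bool.not_eq_true, List.all_eq_true]
        intro hb
        exact hnotall (fun k hk => hb k hk)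
      rw [hfalse, if_neg (by simp : ¬ (false = true))]
  | cons c t ih =>
      simp only [lumosGoA, lumosBuild]
      by_cases hin : PySem.Chars.upperChar c ∈ "LUMOS".toList
      · rw [contains_required_true _ hin, isIn_singleton_true _ hin, if_pos rfl]
        by_cases hmem : PySem.Chars.upperChar c ∈ d.keys
        · -- already collected: both sides leave their state unchanged
          have hc : d.contains (PySem.Chars.upperChar c) = true :=
            (PySem.Dict.contains_iff_mem_keys ..).2 hmem
          have hadd : PySem.Set.add d.keys (PySem.Chars.upperChar c) = d.keys := by
            simp [PySem.Set.add, PySem.Set.contains, hmem]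
          rw [hc, hadd]
          rw [if_neg (by simp : ¬ ((true && !true) = true))]
          have hne : ¬ (PySem.Set.len d.keys = PySem.Set.len lumosRequired) := by
            have h5 : PySem.Set.len lumosRequired = 5 := by decide
            rw [h5]
            simp only [PySem.Set.len]
            intro hEq; omega
          rw [if_neg hne]
          exact ih (i + 1) d hnd hsub (fun v hvv => (hv v hvv).trans (by omega)) hlen
        · -- fresh required letter: A grows collected, B inserts (up, i)
          have hc : d.contains (PySem.Chars.upperChar c) = false := by
            rw [← Bool.not_eq_true, PySem.Dict.contains_iff_mem_keys]; exact hmem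
          have hkeys : (d.insert (PySem.Chars.upperChar c) i).keys
              = d.keys ++ [PySem.Chars.upperChar c] :=
            PySem.Dict.keys_insert_of_not_contains d i hc
          have hvals : (d.insert (PySem.Chars.upperChar c) i).values
              = d.values ++ [i] := by
            simp [PySem.Dict.values, PySem.Dict.items_insert_of_not_contains d i hc]
          have hadd : PySem.Set.add d.keys (PySem.Chars.upperChar c)
              = d.keys ++ [PySem.Chars.upperChar c] := by
            simp [PySem.Set.add, PySem.Set.contains, hmem]
          rw [hc, hadd]
          rw [if_pos (by simp : ((true && !false) = true))]
          have hnd' : (d.keys ++ [PySem.Chars.upperChar c]).Nodup := by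
            rw [List.nodup_append]
            refine ⟨hnd, List.nodup_singleton _, ?_⟩
            intro a ha b hb
            rw [List.mem_singleton] at hb
            subst hb
            exact fun h => hmem (h ▸ ha)
          have hsub' : (d.keys ++ [PySem.Chars.upperChar c]) ⊆ "LUMOS".toList := by
            intro x hx
            rcases List.mem_append.1 hx with h1 | h1
            · exact hsub x h1
            · rw [List.mem_singleton] at h1; subst h1; exact hin
          by_cases hfive : d.keys.length + 1 = 5
          · -- fifth letter found: A returns i + 1, B's dict is full and frozen
            have hlenEq : PySem.Set.len (d.keys ++ [PySem.Chars.upperChar c])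
                = PySem.Set.len lumosRequired := by
              have h5 : PySem.Set.len lumosRequired = 5 := by decide
              rw [h5]
              simp only [PySem.Set.len, List.length_append, List.length_cons, List.length_nil]
              omega
            rw [if_pos hlenEq]
            have hperm : (d.keys ++ [PySem.Chars.upperChar c]).Perm "LUMOS".toList := by
              refine (hnd'.subperm hsub').perm_of_length_le ?_
              have h5 : ("LUMOS".toList).length = 5 := by decide
              simp only [List.length_append, List.length_cons, List.length_nil]
              omega
            have hfull : ∀ k ∈ "LUMOS".toList,
                (d.insert (PySem.Chars.upperChar c) i).contains k = true := by
              intro k hk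
              rw [PySem.Dict.contains_iff_mem_keys, hkeys]
              exact hperm.mem_iff.2 hk
            rw [lumosBuild_fixed t _ hfull (i + 1)]
            simp only [lumosFinish]
            rw [if_pos (List.all_eq_true.2 (fun k hk => hfull k hk)), hvals,
              max?_append_big d.values i hv]
          · -- still missing letters: recurse with the grown state
            have hne : ¬ (PySem.Set.len (d.keys ++ [PySem.Chars.upperChar c])
                = PySem.Set.len lumosRequired) := by
              have h5 : PySem.Set.len lumosRequired = 5 := by decide
              rw [h5]
              simp only [PySem.Set.len, List.length_append, List.length_cons, List.length_nil]
              intro hEq; omega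
            rw [if_neg hne]
            have := ih (i + 1) (d.insert (PySem.Chars.upperChar c) i)
              (hkeys ▸ hnd')
              (by rw [hkeys]; exact hsub')
              (by
                rw [hvals]
                intro v hvv
                rcases List.mem_append.1 hvv with h1 | h1
                · exact (hv v h1).trans (by omega)
                · rw [List.mem_singleton] at h1; subst h1; omega)
              (by rw [hkeys]; simp only [List.length_append, List.length_cons, List.length_nil]; omega)
            rw [← hkeys]
            exact this
      · rw [contains_required_false _ hin, isIn_singleton_false _ hin]
        rw [if_neg (by simp : ¬ (false = true)),
          if_neg (by simp : ¬ ((false && !(d.contains (PySem.Chars.upperChar c))) = true))]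
        exact ih (i + 1) d hnd hsub (fun v hvv => (hv v hvv).trans (by omega)) hlen

-- ===== VERDICT (by name: the statement is the Claim_ definition above) =====
theorem earliest_step_for_lumos_spec : Claim_equal_earliest_step_for_lumos := by
  intro runes _
  unfold Spec_earliest_step_for_lumos
  have h : earliest_step_for_lumos_alt runes
      = lumosFinish (lumosBuild runes.toList 0 PySem.Dict.empty) := rfl
  rw [h]
  have h2 : (PySem.Dict.empty : PySem.Dict Char Int).keys = [] := rfl
  have := lumos_main runes.toList 0 (PySem.Dict.empty)
    (by rw [h2]; exact List.nodup_nil)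
    (by rw [h2]; intro k hk; cases hk)
    (by intro v hvv; cases hvv)
    (by rw [h2]; simp)
  simpa [earliest_step_for_lumos, PySem.Set.empty, h2] using this
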